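-- pv_equiv track=rewrite | github.com/raeez/chiral-bar-cobar | compute/lib/theorem_balduf_gaiotto_formality_engine.py | _wedge_sign
-- ===== SOURCE A (Python) =====
-- from typing import (
--     Any, Dict, FrozenSet, List, Optional, Set, Tuple, Union,
-- )
--
-- def _wedge_sign(S_sorted: List[int], T_sorted: List[int]) -> int:
--     """Sign from interleaving two sorted lists into a single sorted sequence.
--
--     This is the sign of the shuffle permutation.
--     """
--     merged = S_sorted + T_sorted
--     # Count inversions
--     inv = 0
--     for i in range(len(merged)):
--         for j in range(i + 1, len(merged)):
--             if merged[i] > merged[j]: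
--                 inv += 1
--     return 1 if inv % 2 == 0 else -1
-- ===== SOURCE B (Python) =====
-- def _wedge_sign(S_sorted, T_sorted):
--     """Sign of the shuffle permutation, by insertion counting.
--
--     Keeps a sorted prefix of the elements seen so far; each new element
--     closes exactly as many inversions as there are strictly greater
--     elements already in the prefix (a suffix of the sorted prefix).
--     """
--     prefix = []
--     inv = 0
--     for x in S_sorted + T_sorted:
--         k = 0
--         while k < len(prefix) and prefix[k] <= x:
--             k += 1
--         inv += len(prefix) - k
--         prefix.insert(k, x)
--     return 1 if inv % 2 == 0 else -1
-- ===== Notes on version B (the rewrite author's own statement) =====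
-- stated objective: alternative
-- what changed: Single left-to-right pass maintaining a sorted prefix (insertion-sort counting): each element contributes the number of strictly greater elements already seen, instead of A's nested index loops over all pairs.
import Mathlib
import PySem

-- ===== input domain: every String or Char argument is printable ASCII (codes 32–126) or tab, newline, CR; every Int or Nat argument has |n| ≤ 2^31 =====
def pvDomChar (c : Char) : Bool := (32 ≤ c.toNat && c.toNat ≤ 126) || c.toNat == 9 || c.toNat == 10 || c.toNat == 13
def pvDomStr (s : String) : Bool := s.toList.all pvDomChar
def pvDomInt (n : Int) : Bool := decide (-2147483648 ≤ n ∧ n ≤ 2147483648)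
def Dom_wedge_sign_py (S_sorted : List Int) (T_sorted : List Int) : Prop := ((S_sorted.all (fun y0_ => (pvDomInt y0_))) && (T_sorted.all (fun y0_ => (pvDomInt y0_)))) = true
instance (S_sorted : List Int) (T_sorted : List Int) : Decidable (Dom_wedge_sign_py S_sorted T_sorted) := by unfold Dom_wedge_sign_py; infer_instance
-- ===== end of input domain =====

-- B replaces A's nested all-pairs index loops by a single pass that keeps a sorted
-- prefix of the elements seen so far (insertion counting); objective: alternative.

-- ===== PORT A =====
def wedge_sign_py (S_sorted : List Int) (T_sorted : List Int) : Int :=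
  let merged := S_sorted ++ T_sorted
  let n : Int := merged.length
  let inv : Int := (PySem.List.pyRange 0 n 1).foldl (fun inv i =>
    (PySem.List.pyRange (i + 1) n 1).foldl (fun inv j =>
      if PySem.List.pyGetD merged i 0 > PySem.List.pyGetD merged j 0 then inv + 1 else inv) inv) 0
  if inv % 2 == 0 then 1 else -1

-- ===== PORT B =====
-- the `while k < len(prefix) and prefix[k] <= x: k += 1` scan of Source B
def altPos (pfx : List Int) (x : Int) : Nat :=
  match pfx with
  | [] => 0
  | y :: rest => if y ≤ x then altPos rest x + 1 else 0

def wedge_sign_py_alt (S_sorted : List Int) (T_sorted : List Int) : Int :=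
  let st := (S_sorted ++ T_sorted).foldl (fun (st : List Int × Int) x =>
    let k := altPos st.1 x
    (PySem.List.insert st.1 (k : Int) x, st.2 + ((st.1.length : Int) - k))) ([], 0)
  if st.2 % 2 == 0 then 1 else -1

-- ===== PRECONDITION & SPEC =====
def Spec_wedge_sign_py (S_sorted : List Int) (T_sorted : List Int) (out : Int) : Prop := out = wedge_sign_py_alt S_sorted T_sorted
instance (S_sorted : List Int) (T_sorted : List Int) (out : Int) : Decidable (Spec_wedge_sign_py S_sorted T_sorted out) := by unfold Spec_wedge_sign_py; infer_instance

-- ===== CLAIM (what is proved, stated in full; the proofs are below) =====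
def Claim_equal_wedge_sign_py : Prop := ∀ (S_sorted : List Int) (T_sorted : List Int), Dom_wedge_sign_py S_sorted T_sorted → Spec_wedge_sign_py S_sorted T_sorted (wedge_sign_py S_sorted T_sorted)

-- ===== LEMMAS AND PROOFS =====

/-- Number of inversions of a list. -/
def invCount : List Int → Nat
  | [] => 0
  | x :: xs => xs.countP (fun y => decide (y < x)) + invCount xs

/-- Cross inversions: for each x of l, elements of p strictly greater than x. -/
def cross (p l : List Int) : Nat :=
  (l.map (fun x => p.countP (fun y => decide (x < y)))).sum

lemma cross_nil_left (l : List Int) : cross [] l = 0 := by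
  simp [cross, List.countP_nil]

lemma cross_cons_right (q : List Int) (x : Int) (xs : List Int) :
    cross q (x :: xs) = q.countP (fun y => decide (x < y)) + cross q xs := by
  simp [cross]

lemma cross_cons_left (z : Int) (q xs : List Int) :
    cross (z :: q) xs = xs.countP (fun y => decide (y < z)) + cross q xs := by
  induction xs with
  | nil => simp [cross]
  | cons y ys ih =>
    simp [cross_cons_right, List.countP_cons] at ih ⊢
    rw [ih]
    by_cases h : y < z <;> simp [h] <;> omega

lemma altPos_le (p : List Int) (x : Int) : altPos p x ≤ p.length := by
  induction p with
  | nil => simp [altPos]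
  | cons y rest ih => by_cases h : y ≤ x <;> simp [altPos, h]; omega

lemma altPos_sorted (p : List Int) (x : Int) (h : p.Pairwise (· ≤ ·)) :
    p.length - altPos p x = p.countP (fun y => decide (x < y)) := by
  induction p with
  | nil => simp [altPos]
  | cons y rest ih =>
    rcases List.pairwise_cons.mp h with ⟨hy, hrest⟩
    by_cases hyx : y ≤ x
    · have hx : ¬ x < y := not_lt.mpr hyx
      simp [altPos, hyx, hx, ih hrest]
    · have hx : x < y := lt_of_not_ge hyx
      have hall : rest.countP (fun y => decide (x < y)) = rest.length :=
        List.countP_eq_length.mpr (fun z hz => decide_eq_true (lt_of_lt_of_le hx (hy z hz)))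
      simp [altPos, hyx, hx, hall]

lemma mem_take_altPos (p : List Int) (x y : Int) (h : y ∈ p.take (altPos p x)) : y ≤ x := by
  induction p with
  | nil => simp [altPos] at h
  | cons z rest ih =>
    by_cases hz : z ≤ x
    · simp [altPos, hz] at h
      rcases h with h | h
      · exact h ▸ hz
      · exact ih h
    · simp [altPos, hz] at h

lemma mem_drop_altPos (p : List Int) (x y : Int) (hs : p.Pairwise (· ≤ ·))
    (h : y ∈ p.drop (altPos p x)) : x ≤ y := by
  induction p with
  | nil => simp [altPos] at h
  | cons z rest ih =>
    rcases List.pairwise_cons.mp hs with ⟨hz', hrest⟩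
    by_cases hz : z ≤ x
    · simp [altPos, hz] at h
      exact ih hrest h
    · have hx : x < z := lt_of_not_ge hz
      simp [altPos, hz] at h
      rcases h with h | h
      · exact le_of_lt (h ▸ hx)
      · exact le_of_lt (lt_of_lt_of_le hx (hz' y h))

lemma insert_altPos_eq (p : List Int) (x : Int) :
    PySem.List.insert p ((altPos p x : Nat) : Int) x
      = p.take (altPos p x) ++ x :: p.drop (altPos p x) :=
  PySem.List.insert_natCast p (altPos p x) x (altPos_le p x)

lemma insert_altPos_perm (p : List Int) (x : Int) :
    (PySem.List.insert p ((altPos p x : Nat) : Int) x).Perm (x :: p) := by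
  rw [insert_altPos_eq]
  calc (p.take (altPos p x) ++ x :: p.drop (altPos p x)).Perm
        (x :: (p.take (altPos p x) ++ p.drop (altPos p x))) := List.perm_middle
    _ = _ := by rw [List.take_append_drop]

lemma insert_altPos_sorted (p : List Int) (x : Int) (hs : p.Pairwise (· ≤ ·)) :
    (PySem.List.insert p ((altPos p x : Nat) : Int) x).Pairwise (· ≤ ·) := by
  rw [insert_altPos_eq]
  have hTake : (p.take (altPos p x)).Pairwise (· ≤ ·) := hs.sublist (List.take_sublist _ _)
  have hDrop : (p.drop (altPos p x)).Pairwise (· ≤ ·) := hs.sublist (List.drop_sublist _ _)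
  refine List.pairwise_append.mpr ⟨hTake, ?_, ?_⟩
  · refine List.pairwise_cons.mpr ⟨fun y hy => mem_drop_altPos p x y hs hy, hDrop⟩
  · intro a ha b hb
    rcases List.mem_cons.mp hb with hb | hb
    · exact le_of_le_of_eq (mem_take_altPos p x a ha) hb.symm
    · exact le_trans (mem_take_altPos p x a ha) (mem_drop_altPos p x b hs hb)

/-- Loop invariant of B's fold: p is a sorted permutation of q, and the pass adds
    the cross inversions against q plus the internal inversions of l. -/
lemma alt_loop (l : List Int) : ∀ (p q : List Int) (inv : Int), p.Perm q → p.Pairwise (· ≤ ·) →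
    (l.foldl (fun (st : List Int × Int) x =>
      let k := altPos st.1 x
      (PySem.List.insert st.1 (k : Int) x, st.2 + ((st.1.length : Int) - k))) (p, inv)).2
    = inv + (cross q l : Int) + (invCount l : Int) := by
  induction l with
  | nil => intro p q inv _ _; simp [invCount]
  | cons x xs ih =>
    intro p q inv hperm hsorted
    have hlen : ((p.length : Int) - (altPos p x : Nat)) = ((p.countP (fun y => decide (x < y)) : Nat) : Int) := by
      have := altPos_sorted p x hsorted
      have h2 := altPos_le p x
      omega
    have hcq : p.countP (fun y => decide (x < y)) = q.countP (fun y => decide (x < y)) :=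
      hperm.countP_eq _
    simp only [List.foldl_cons]
    rw [ih _ (x :: q) _ ((insert_altPos_perm p x).trans (hperm.cons x))
        (insert_altPos_sorted p x hsorted)]
    rw [hlen, hcq, cross_cons_right, cross_cons_left]
    simp [invCount]
    ring

lemma foldl_if_lt (x : Int) (l : List Int) (acc : Int) :
    l.foldl (fun inv v => if x > v then inv + 1 else inv) acc
      = acc + (l.countP (fun y => decide (y < x)) : Nat) := by
  induction l generalizing acc with
  | nil => simp
  | cons v vs ih =>
    simp only [List.foldl_cons, List.countP_cons]
    by_cases h : x > v <;> simp [h, ih]; ring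

/-- A's inner loop counts, among indices after i, the elements smaller than merged[i]. -/
lemma a_inner (m : List Int) (x : Int) (a : Nat) (acc : Int) :
    (PySem.List.pyRange (a : Int) (m.length : Int) 1).foldl
      (fun inv j => if x > PySem.List.pyGetD m j 0 then inv + 1 else inv) acc
    = acc + ((m.drop a).countP (fun y => decide (y < x)) : Nat) := by
  rw [PySem.List.foldl_pyRange_pyGetD' m 0 (fun inv v => if x > v then inv + 1 else inv) acc
        (a := (a : Int)) (by positivity)]
  simp only [Int.toNat_natCast]
  rw [foldl_if_lt]

/-- A's outer loop from index a accumulates the inversions of m.drop a. -/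
lemma a_outer (m : List Int) : ∀ (a : Nat) (acc : Int),
    (PySem.List.pyRange (a : Int) (m.length : Int) 1).foldl (fun inv i =>
      (PySem.List.pyRange (i + 1) (m.length : Int) 1).foldl
        (fun inv j => if PySem.List.pyGetD m i 0 > PySem.List.pyGetD m j 0 then inv + 1 else inv) inv) acc
    = acc + (invCount (m.drop a) : Nat) := by
  intro a acc
  by_cases ha : a < m.length
  · rw [PySem.List.pyRange_one_cons (by exact_mod_cast ha)]
    simp only [List.foldl_cons]
    have h1 : ((a : Int) + 1) = ((a + 1 : Nat) : Int) := by push_cast; ring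
    rw [h1, a_inner m (PySem.List.pyGetD m a 0) (a + 1) acc, a_outer m (a + 1)]
    have hget : PySem.List.pyGetD m (a : Int) 0 = m[a] := by
      rw [PySem.List.pyGetD_natCast]; exact List.getD_eq_getElem m 0 ha
    have hdrop : m.drop a = m[a] :: m.drop (a + 1) := List.drop_eq_getElem_cons ha
    rw [hget, hdrop]
    simp [invCount]
    ring
  · rw [PySem.List.pyRange_one_eq_nil (by exact_mod_cast not_lt.mp ha)]
    rw [List.drop_eq_nil_of_le (not_lt.mp ha)]
    simp [invCount]
termination_by a => m.length - a
decreasing_by omega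

-- ===== VERDICT (by name: the statement is the Claim_ definition above) =====
theorem wedge_sign_py_spec : Claim_equal_wedge_sign_py := by
  unfold Claim_equal_wedge_sign_py
  intro S T _
  unfold Spec_wedge_sign_py wedge_sign_py wedge_sign_py_alt
  have hA := a_outer (S ++ T) 0 0
  simp only [Nat.cast_zero, List.drop_zero] at hA
  have hB := alt_loop (S ++ T) [] [] 0 (List.Perm.refl _) (List.Pairwise.nil)
  simp only [cross_nil_left, Nat.cast_zero] at hB
  simp only [hA, hB]
  norm_num
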